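-- pv_equiv track=rewrite | github.com/colinmacgiolla/advent-of-code-2023 | day-09/main.py | calculate_sequence
-- ===== SOURCE A (Python) =====
-- from itertools import pairwise
--
-- def allEqual(iterable):
--     iterator = iter(iterable)
--
--     try:
--         firstItem = next(iterator)
--     except StopIteration:
--         return True
--
--     for x in iterator:
--         if x!=firstItem:
--             return False
--     return True
--
-- def calculate_sequence(data):
--     prediction = data[-1]
--
--     while data:
--         if allEqual(data):
--             break
--         data = [ current - previous for previous, current in pairwise(data) ]
--         prediction += data[-1]
--     return prediction
-- ===== SOURCE B (Python) =====
-- def calculate_sequence(data):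
--     # Newton forward-difference closed form: next value = sum_{j=0}^{n-1} (-1)^j * C(n, j+1) * data[n-1-j]
--     n = len(data)
--     total = 0
--     sign = 1
--     c = n  # C(n, 1)
--     for j in range(n):
--         total += sign * c * data[n - 1 - j]
--         sign = -sign
--         c = c * (n - j - 1) // (j + 2)  # C(n, j+2)
--     return total
-- ===== Notes on version B (the rewrite author's own statement) =====
-- stated objective: faster
-- what changed: Replaces A's repeated difference-table passes (rebuilding the list of pairwise differences until a level is constant) by Newton's forward-difference closed form: a single O(n) loop summing (-1)^j * C(n,j+1) * data[n-1-j] with the binomial coefficient updated incrementally.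
import Mathlib
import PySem

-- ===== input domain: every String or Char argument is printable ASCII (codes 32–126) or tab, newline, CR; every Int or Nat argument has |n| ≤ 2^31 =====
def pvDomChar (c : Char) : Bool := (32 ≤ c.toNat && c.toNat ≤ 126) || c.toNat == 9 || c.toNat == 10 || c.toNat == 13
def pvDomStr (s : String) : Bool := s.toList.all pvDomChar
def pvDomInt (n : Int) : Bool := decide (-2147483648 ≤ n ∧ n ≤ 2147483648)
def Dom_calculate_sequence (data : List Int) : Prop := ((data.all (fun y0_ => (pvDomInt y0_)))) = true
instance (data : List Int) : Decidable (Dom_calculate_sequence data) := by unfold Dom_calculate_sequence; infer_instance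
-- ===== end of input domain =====

-- B replaces A's O(n^2) repeated difference-table pass by Newton's forward-difference
-- closed form: one O(n) binomial-weighted sum over the input (objective: faster).

-- ===== PORT A =====
-- allEqual: 'for x in iterator: if x != firstItem: return False' as a structural loop
def pvAllEqualLoop (firstItem : Int) : List Int → Bool
  | [] => true
  | x :: rest => if x ≠ firstItem then false else pvAllEqualLoop firstItem rest

def pvAllEqual (xs : List Int) : Bool :=
  match xs with
  | [] => true
  | firstItem :: rest => pvAllEqualLoop firstItem rest

-- [current - previous for previous, current in pairwise(data)]
def pvDif (xs : List Int) : List Int :=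
  (xs.zip xs.tail).map (fun pc => pc.2 - pc.1)

theorem pvDif_length (xs : List Int) : (pvDif xs).length = xs.length - 1 := by
  simp [pvDif]

-- the 'while data:' loop (terminates: each pass shortens data by one)
def pvLoopA (data : List Int) (prediction : Int) : Int :=
  if data.isEmpty then prediction
  else if pvAllEqual data then prediction
  else
    let d := pvDif data
    pvLoopA d (prediction + (PySem.List.pyGet? d (-1)).getD 0)  -- d nonempty here, so getD never used
termination_by data.length
decreasing_by
  rw [pvDif_length]
  cases data with
  | nil => simp_all
  | cons x t => simp

def calculate_sequence (data : List Int) : Int :=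
  match PySem.List.pyGet? data (-1) with
  | none => 0  -- unreachable under Pre_ (Python raises IndexError on empty data)
  | some prediction => pvLoopA data prediction

-- ===== PORT B =====
def calculate_sequence_alt (data : List Int) : Int :=
  let n : Int := data.length
  ((PySem.List.pyRange 0 n 1).foldl
    (fun (st : Int × Int × Int) j =>
      (st.1 + st.2.1 * st.2.2 * PySem.List.pyGetD data (n - 1 - j) 0,  -- index n-1-j always in range
       -st.2.1,
       PySem.Int.floordiv (st.2.2 * (n - j - 1)) (j + 2)))
    (0, 1, n)).1

-- ===== PRECONDITION & SPEC =====
-- Pre_ excludes only the empty list, on which A raises IndexError when it reads the last element.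
def Pre_calculate_sequence (data : List Int) : Prop := data ≠ []
instance (data : List Int) : Decidable (Pre_calculate_sequence data) := by unfold Pre_calculate_sequence; infer_instance
def pvWitness_calculate_sequence : List Int := [1, 3, 6, 10]

def Spec_calculate_sequence (data : List Int) (out : Int) : Prop := out = calculate_sequence_alt data
instance (data : List Int) (out : Int) : Decidable (Spec_calculate_sequence data out) := by unfold Spec_calculate_sequence; infer_instance

-- ===== CLAIM (what is proved, stated in full; the proofs are below) =====
def Claim_equal_calculate_sequence : Prop := ∀ (data : List Int), Dom_calculate_sequence data → Pre_calculate_sequence data → Spec_calculate_sequence data (calculate_sequence data)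

-- ===== LEMMAS AND PROOFS =====

-- the Newton sum N(l) = Σ_j (-1)^j C(|l|, j+1) l[j]  (on the REVERSED data)
def pvN (l : List Int) : Int :=
  ∑ j ∈ Finset.range l.length, (-1 : Int) ^ j * (l.length.choose (j + 1) : Int) * l.getD j 0

-- reference recursion: head + recurse on first differences of the reversed list
def pvRS : List Int → Int
  | [] => 0
  | a :: t => a + pvRS (List.zipWith (· - ·) (a :: t) t)
termination_by l => l.length
decreasing_by simp [List.length_zipWith]

-- zipWith truncates its longer argument
theorem pv_zipWith_take (f : Int → Int → Int) :
    ∀ (as bs : List Int), List.zipWith f as bs = List.zipWith f (as.take bs.length) bs := by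
  intro as
  induction as with
  | nil => intro bs; simp
  | cons a as ih =>
    intro bs
    cases bs with
    | nil => simp
    | cons b bs => simp [ih bs]

theorem pvRS_nil : pvRS [] = 0 := by rw [pvRS.eq_def]

theorem pvRS_cons (a : Int) (t : List Int) :
    pvRS (a :: t) = a + pvRS (List.zipWith (· - ·) (a :: t) t) := by rw [pvRS.eq_def]

theorem pvDif_eq (xs : List Int) :
    pvDif xs = List.zipWith (fun p c => c - p) xs xs.tail := by
  simp [pvDif, List.zip, List.map_zipWith]

theorem pv_take_tail_len (xs : List Int) : xs.take xs.tail.length = xs.dropLast := by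
  rw [List.dropLast_eq_take, List.length_tail]

theorem pvDif_reverse (xs : List Int) :
    (pvDif xs).reverse = List.zipWith (· - ·) xs.reverse xs.reverse.tail := by
  rw [pvDif_eq, pv_zipWith_take _ xs xs.tail, pv_take_tail_len,
      List.reverse_zipWith (by simp),
      ← List.tail_reverse, ← List.dropLast_reverse]
  conv_rhs => rw [pv_zipWith_take _ xs.reverse xs.reverse.tail, pv_take_tail_len,
                  List.zipWith_comm]

-- Pascal-identity step: N(a :: t) = a + N(first differences)
theorem pvN_cons (a : Int) (t : List Int) :
    pvN (a :: t) = a + pvN (List.zipWith (· - ·) (a :: t) t) := by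
  obtain ⟨m, hmdef⟩ : ∃ m, t.length = m := ⟨t.length, rfl⟩
  have hlen : (List.zipWith (· - ·) (a :: t) t).length = m := by
    simp [List.length_zipWith, hmdef]
  have hget : ∀ j, j < m → (List.zipWith (· - ·) (a :: t) t).getD j 0
      = (a :: t).getD j 0 - (a :: t).getD (j + 1) 0 := by
    intro j hj
    rw [List.getD_eq_getElem _ _ (by rw [hlen]; exact hj), List.getElem_zipWith,
        List.getD_eq_getElem _ _ (by simp; omega), List.getD_eq_getElem _ _ (by simp; omega)]
    simp
  unfold pvN
  rw [hlen]
  simp only [List.length_cons, hmdef]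
  have hR : ∑ j ∈ Finset.range m, (-1 : Int) ^ j * (m.choose (j + 1) : Int) * (List.zipWith (· - ·) (a :: t) t).getD j 0
      = (∑ j ∈ Finset.range m, (-1 : Int) ^ j * (m.choose (j + 1) : Int) * (a :: t).getD j 0)
        - ∑ j ∈ Finset.range m, (-1 : Int) ^ j * (m.choose (j + 1) : Int) * (a :: t).getD (j + 1) 0 := by
    rw [← Finset.sum_sub_distrib]
    refine Finset.sum_congr rfl ?_
    intro j hj
    rw [hget j (Finset.mem_range.mp hj)]
    ring
  have hS : ∑ j ∈ Finset.range (m + 1), (-1 : Int) ^ j * (m.choose j : Int) * (a :: t).getD j 0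
      = -(∑ j ∈ Finset.range m, (-1 : Int) ^ j * (m.choose (j + 1) : Int) * (a :: t).getD (j + 1) 0) + a := by
    rw [Finset.sum_range_succ' (fun j => (-1 : Int) ^ j * (m.choose j : Int) * (a :: t).getD j 0)]
    rw [← Finset.sum_neg_distrib]
    congr 1
    · refine Finset.sum_congr rfl ?_
      intro j hj
      rw [pow_succ]
      ring
    · simp
  have hPascal : ∑ j ∈ Finset.range (m + 1), (-1 : Int) ^ j * ((m + 1).choose (j + 1) : Int) * (a :: t).getD j 0
      = (∑ j ∈ Finset.range (m + 1), (-1 : Int) ^ j * (m.choose j : Int) * (a :: t).getD j 0)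
        + ∑ j ∈ Finset.range (m + 1), (-1 : Int) ^ j * (m.choose (j + 1) : Int) * (a :: t).getD j 0 := by
    rw [← Finset.sum_add_distrib]
    refine Finset.sum_congr rfl ?_
    intro j hj
    have : ((m + 1).choose (j + 1) : Int) = (m.choose j : Int) + (m.choose (j + 1) : Int) := by
      exact_mod_cast Nat.choose_succ_succ m j
    rw [this]
    ring
  have hTop : ∑ j ∈ Finset.range (m + 1), (-1 : Int) ^ j * (m.choose (j + 1) : Int) * (a :: t).getD j 0
      = ∑ j ∈ Finset.range m, (-1 : Int) ^ j * (m.choose (j + 1) : Int) * (a :: t).getD j 0 := by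
    rw [Finset.sum_range_succ]
    simp [Nat.choose_succ_self]
  rw [hPascal, hS, hTop, hR]
  ring

theorem pvRS_eq_pvN (l : List Int) : pvRS l = pvN l := by
  induction hn : l.length using Nat.strong_induction_on generalizing l with
  | _ n ih =>
    cases l with
    | nil => simp [pvRS_nil, pvN]
    | cons a t =>
      rw [pvRS_cons, pvN_cons]
      congr 1
      exact ih (List.zipWith (· - ·) (a :: t) t).length
        (by rw [← hn]; simp [List.length_zipWith]) _ rfl

theorem pvAllEqualLoop_zipWith :
    ∀ (t : List Int) (x : Int), pvAllEqualLoop x t = true →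
      List.zipWith (fun p c => c - p) (x :: t) t = List.replicate t.length 0 := by
  intro t
  induction t with
  | nil => intro x _; rfl
  | cons y t ih =>
    intro x h
    rw [pvAllEqualLoop] at h
    split at h
    · exact absurd h (by simp)
    · rename_i hyx
      have hyx' : y = x := by by_contra hc; exact hyx hc
      subst hyx'
      simp only [List.zipWith_cons_cons, List.length_cons, List.replicate_succ, sub_self]
      exact congrArg (0 :: ·) (ih _ h)

theorem pv_zipWith_replicate (k : Nat) :
    List.zipWith (· - ·) ((0 : Int) :: List.replicate k 0) (List.replicate k 0) = List.replicate k 0 := by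
  induction k with
  | zero => rfl
  | succ k ih =>
    rw [List.replicate_succ]
    simp only [List.zipWith_cons_cons, sub_self]
    exact congrArg (0 :: ·) ih

theorem pvRS_replicate (k : Nat) : pvRS (List.replicate k (0 : Int)) = 0 := by
  induction k with
  | zero => simp [pvRS]
  | succ k ih =>
    rw [List.replicate_succ, pvRS, pv_zipWith_replicate k, ih, add_zero]

-- pvRS on a nonempty reversed list, written through the original orientation
theorem pvRS_reverse (d : List Int) (hd : d ≠ []) :
    pvRS d.reverse = d.getLast?.getD 0 + pvRS (pvDif d).reverse := by
  cases hrev : d.reverse with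
  | nil => exact absurd (by simpa using congrArg List.reverse hrev) hd
  | cons a t =>
    have hhead : d.getLast?.getD 0 = a := by
      rw [← List.head?_reverse, hrev]; rfl
    rw [pvRS_cons, pvDif_reverse, hrev, hhead]
    rfl

theorem pvLoopA_eq (xs : List Int) (hxs : xs ≠ []) (p : Int) :
    pvLoopA xs p = p + pvRS (pvDif xs).reverse := by
  induction hn : xs.length using Nat.strong_induction_on generalizing xs p with
  | _ n ih =>
    rw [pvLoopA.eq_def, if_neg (by simpa [List.isEmpty_iff] using hxs)]
    by_cases hall : pvAllEqual xs = true
    · rw [if_pos hall]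
      cases xs with
      | nil => exact absurd rfl hxs
      | cons x t =>
        have hz : pvDif (x :: t) = List.replicate t.length 0 := by
          rw [pvDif_eq]
          exact pvAllEqualLoop_zipWith t x (by simpa [pvAllEqual] using hall)
        rw [hz, List.reverse_replicate, pvRS_replicate, add_zero]
    · rw [if_neg hall]
      have hlen2 : 2 ≤ xs.length := by
        match xs with
        | [] => exact absurd rfl hxs
        | [x] => exact absurd (by rfl) hall
        | x :: y :: t => simp
      have hd : pvDif xs ≠ [] := by
        intro hc
        have := pvDif_length xs
        rw [hc] at this
        simp at this
        omega
      rw [ih (pvDif xs).length (by rw [pvDif_length]; omega) (pvDif xs) hd _ rfl,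
          pvRS_reverse (pvDif xs) hd, PySem.List.pyGet?_neg_one]
      ring

-- A computes pvRS (reverse data)
theorem calcA_eq (data : List Int) (h : data ≠ []) :
    calculate_sequence data = pvRS data.reverse := by
  unfold calculate_sequence
  rw [PySem.List.pyGet?_neg_one]
  cases hL : data.getLast? with
  | none => exact absurd (List.getLast?_eq_none_iff.mp hL) h
  | some v =>
    simp only
    rw [pvLoopA_eq data h v, pvRS_reverse data h, hL]
    rfl

-- B computes pvN (reverse data)
theorem calcB_fold (data : List Int) :
    ∀ m, m ≤ data.length →
    (List.foldl (fun (st : Int × Int × Int) (j : Int) =>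
        (st.1 + st.2.1 * st.2.2 * PySem.List.pyGetD data ((data.length : Int) - 1 - j) 0,
         -st.2.1,
         PySem.Int.floordiv (st.2.2 * ((data.length : Int) - j - 1)) (j + 2)))
      (0, 1, (data.length : Int))
      (List.map (fun (k : Nat) => (k : Int)) (List.range m)))
    = (∑ j ∈ Finset.range m, (-1 : Int) ^ j * (data.length.choose (j + 1) : Int) * data.getD (data.length - 1 - j) 0,
       (-1 : Int) ^ m,
       (data.length.choose (m + 1) : Int)) := by
  intro m
  induction m with
  | zero => simp [Nat.choose_one_right]
  | succ m ih =>
    intro h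
    rw [List.range_succ, List.map_append, List.foldl_append, ih (by omega)]
    simp only [List.map_cons, List.map_nil, List.foldl_cons, List.foldl_nil]
    refine Prod.ext ?_ (Prod.ext ?_ ?_)
    · simp only
      have hidx : ((data.length : Int) - 1 - (m : Int)) = ((data.length - 1 - m : Nat) : Int) := by
        omega
      rw [hidx, PySem.List.pyGetD_natCast, Finset.sum_range_succ]
    · simp [pow_succ]
    · simp only
      have h1 : ((data.length : Int) - (m : Int) - 1) = ((data.length - (m + 1) : Nat) : Int) := by
        omega
      have h2 : ((m : Int) + 2) = ((m + 2 : Nat) : Int) := by omega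
      rw [h1, h2, ← Nat.cast_mul, ← Nat.choose_succ_right_eq data.length (m + 1),
          PySem.Int.floordiv_natCast, Nat.mul_div_cancel _ (by omega : 0 < m + 2)]

theorem calcB_eq (data : List Int) :
    calculate_sequence_alt data = pvN data.reverse := by
  simp only [calculate_sequence_alt]
  rw [PySem.List.pyRange_zero_natCast, calcB_fold data data.length le_rfl]
  unfold pvN
  simp only [List.length_reverse]
  refine Finset.sum_congr rfl ?_
  intro j hj
  have hj' : j < data.length := Finset.mem_range.mp hj
  rw [List.getD_eq_getElem data _ (by omega : data.length - 1 - j < data.length),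
      List.getD_eq_getElem data.reverse _ (by simpa using hj'),
      List.getElem_reverse]

-- ===== VERDICT (by name: the statement is the Claim_ definition above) =====
theorem calculate_sequence_spec : Claim_equal_calculate_sequence := by
  intro data _ hpre
  unfold Spec_calculate_sequence
  rw [calcA_eq data hpre, calcB_eq data, pvRS_eq_pvN]
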